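-- pv_equiv track=rewrite | github.com/vsayala/chatbot-automated-data-engineering-pipeline | src/agentic_de_pipeline/agents/requirement_agent.py | _has_answer_for
-- ===== SOURCE A (Python) =====
-- def _has_answer_for(question: str, answers: dict[str, str]) -> bool:
--     """Check if answers include explicit response for question semantics."""
--     question_key = question.lower()
--     for key, value in answers.items():
--         candidate = f"{key.lower()} {value.lower()}"
--         if "catalog" in question_key and "." in value:
--             return True
--         if "source type" in question_key and any(term in candidate for term in ("jdbc", "flat", "volume", "csv")):
--             return True
--         if "append or overwrite" in question_key and any(term in candidate for term in ("append", "overwrite")):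
--             return True
--         if "repository" in question_key and value.strip():
--             return True
--         if "acceptance criteria" in question_key and value.strip():
--             return True
--     return False
-- ===== SOURCE B (Python) =====
-- def _has_answer_for(question: str, answers: dict[str, str]) -> bool:
--     """Staged passes: test each question category in turn; an active category
--     runs its own dedicated scan over the answers (loop nesting swapped vs. a
--     per-item branch cascade; correct because the existentials commute)."""
--     q = question.lower()
--     if "catalog" in q and any("." in v for v in answers.values()):
--         return True
--     if "source type" in q and any(
--             t in f"{k.lower()} {v.lower()}"
--             for k, v in answers.items() for t in ("jdbc", "flat", "volume", "csv")):
--         return True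
--     if "append or overwrite" in q and any(
--             t in f"{k.lower()} {v.lower()}"
--             for k, v in answers.items() for t in ("append", "overwrite")):
--         return True
--     if ("repository" in q or "acceptance criteria" in q) and any(
--             v.strip() for v in answers.values()):
--         return True
--     return False
-- ===== Notes on version B (the rewrite author's own statement) =====
-- stated objective: alternative
-- what changed: B swaps the loop nesting: instead of A's single pass over the answers with a cascade of five question-keyword branches per item, B stages the work by question category - each active category runs its own dedicated scan over the answers (the two strip()-based categories merged into one scan), so the question substring tests run once instead of per item.
import Mathlib
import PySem

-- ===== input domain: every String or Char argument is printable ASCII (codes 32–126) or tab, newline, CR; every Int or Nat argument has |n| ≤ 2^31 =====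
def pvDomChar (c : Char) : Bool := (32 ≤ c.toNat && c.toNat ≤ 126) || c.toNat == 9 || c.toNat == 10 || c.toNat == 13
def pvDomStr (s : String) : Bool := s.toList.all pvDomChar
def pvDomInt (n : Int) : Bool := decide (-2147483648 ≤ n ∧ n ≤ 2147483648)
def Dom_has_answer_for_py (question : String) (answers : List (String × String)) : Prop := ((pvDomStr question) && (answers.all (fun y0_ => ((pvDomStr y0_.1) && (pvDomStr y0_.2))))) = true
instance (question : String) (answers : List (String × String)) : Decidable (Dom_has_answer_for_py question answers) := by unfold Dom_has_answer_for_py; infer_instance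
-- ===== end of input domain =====

-- B change (objective: alternative): B swaps the loop nesting — staged per-category scans over
-- the answers instead of A's single pass with a per-item cascade of five question branches.

-- ===== PORT A =====
def hafLoop (questionKey : String) : List (String × String) → Bool
  | [] => false
  | (key, value) :: rest =>
    let candidate := PySem.Str.lower key ++ " " ++ PySem.Str.lower value
    if PySem.Str.isIn "catalog" questionKey && PySem.Str.isIn "." value then true
    else if PySem.Str.isIn "source type" questionKey &&
        ["jdbc", "flat", "volume", "csv"].any (fun t => PySem.Str.isIn t candidate) then true
    else if PySem.Str.isIn "append or overwrite" questionKey &&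
        ["append", "overwrite"].any (fun t => PySem.Str.isIn t candidate) then true
    else if PySem.Str.isIn "repository" questionKey && !(PySem.Str.strip value == "") then true
    else if PySem.Str.isIn "acceptance criteria" questionKey && !(PySem.Str.strip value == "") then true
    else hafLoop questionKey rest

def has_answer_for_py (question : String) (answers : List (String × String)) : Bool :=
  hafLoop (PySem.Str.lower question) answers

-- ===== PORT B =====
def has_answer_for_py_alt (question : String) (answers : List (String × String)) : Bool :=
  let q := PySem.Str.lower question
  if PySem.Str.isIn "catalog" q && answers.any (fun kv => PySem.Str.isIn "." kv.2) then true
  else if PySem.Str.isIn "source type" q && answers.any (fun kv =>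
      ["jdbc", "flat", "volume", "csv"].any
        (fun t => PySem.Str.isIn t (PySem.Str.lower kv.1 ++ " " ++ PySem.Str.lower kv.2))) then true
  else if PySem.Str.isIn "append or overwrite" q && answers.any (fun kv =>
      ["append", "overwrite"].any
        (fun t => PySem.Str.isIn t (PySem.Str.lower kv.1 ++ " " ++ PySem.Str.lower kv.2))) then true
  else if (PySem.Str.isIn "repository" q || PySem.Str.isIn "acceptance criteria" q) &&
      answers.any (fun kv => !(PySem.Str.strip kv.2 == "")) then true
  else false

-- ===== PRECONDITION & SPEC =====
def Spec_has_answer_for_py (question : String) (answers : List (String × String)) (out : Bool) : Prop := out = has_answer_for_py_alt question answers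
instance (question : String) (answers : List (String × String)) (out : Bool) : Decidable (Spec_has_answer_for_py question answers out) := by unfold Spec_has_answer_for_py; infer_instance

-- ===== CLAIM (what is proved, stated in full; the proofs are below) =====
def Claim_equal_has_answer_for_py : Prop := ∀ (question : String) (answers : List (String × String)), Dom_has_answer_for_py question answers → Spec_has_answer_for_py question answers (has_answer_for_py question answers)

-- ===== LEMMAS AND PROOFS =====
theorem bool_if_or (b x : Bool) : (if b then true else x) = (b || x) := by
  cases b <;> simp

theorem any_or {α : Type} (l : List α) (f g : α → Bool) :
    (l.any fun x => f x || g x) = (l.any f || l.any g) := by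
  induction l with
  | nil => rfl
  | cons a t ih =>
    simp only [List.any_cons, ih]
    cases f a <;> cases g a <;> simp

theorem any_and_const {α : Type} (c : Bool) (l : List α) (f : α → Bool) :
    (l.any fun x => c && f x) = (c && l.any f) := by
  cases c <;> simp

theorem hafLoop_eq_any (q : String) (answers : List (String × String)) :
    hafLoop q answers = answers.any (fun kv =>
      (PySem.Str.isIn "catalog" q && PySem.Str.isIn "." kv.2) ||
      (PySem.Str.isIn "source type" q && ["jdbc", "flat", "volume", "csv"].any
          (fun t => PySem.Str.isIn t (PySem.Str.lower kv.1 ++ " " ++ PySem.Str.lower kv.2))) ||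
      (PySem.Str.isIn "append or overwrite" q && ["append", "overwrite"].any
          (fun t => PySem.Str.isIn t (PySem.Str.lower kv.1 ++ " " ++ PySem.Str.lower kv.2))) ||
      ((PySem.Str.isIn "repository" q || PySem.Str.isIn "acceptance criteria" q) &&
          !(PySem.Str.strip kv.2 == ""))) := by
  induction answers with
  | nil => rfl
  | cons kv rest ih =>
    obtain ⟨k, v⟩ := kv
    rw [List.any_cons, ← ih]
    show (if _ then _ else _) = _
    simp only [bool_if_or, Bool.and_or_distrib_right, Bool.or_assoc]

-- ===== VERDICT (by name: the statement is the Claim_ definition above) =====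
theorem has_answer_for_py_spec : Claim_equal_has_answer_for_py := by
  intro question answers _
  unfold Spec_has_answer_for_py has_answer_for_py has_answer_for_py_alt
  rw [hafLoop_eq_any]
  simp only [bool_if_or, Bool.or_false, any_or, any_and_const, Bool.or_assoc]
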